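-- pv_equiv track=rewrite | github.com/RianBrenoPolonini/Prog-I | prova_runcode/p2/ex4.py | cont_dias
-- ===== SOURCE A (Python) =====
-- def cont_dias(dias, chocadeiras, frangos, maior):
--     contador = 1
--     while contador < maior:
--         medio = (contador + maior) >> 1
--         itm = busca(dias, chocadeiras, medio)
--
--         if itm < frangos:
--             contador = medio + 1
--         else:
--             maior = medio
--     return maior
--
-- def busca(dias, chocadeiras, tempo):
--     contador = 0
--     for i in range(chocadeiras):
--         contador += tempo // dias[i]
--     return contador
-- ===== SOURCE B (Python) =====
-- def cont_dias(dias, chocadeiras, frangos, maior):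
--     # Materialise the prefix of hatcheries once; hatched(t) is a structural
--     # walk over that list; binary search is a recursive descent with the
--     # flipped ("enough chickens") test, so the low branch comes first.
--     active = dias[:max(chocadeiras, 0)]
--
--     def hatched(t):
--         total = 0
--         for d in active:
--             total += t // d
--         return total
--
--     def search(lo, hi):
--         if hi <= lo:
--             return hi
--         m = (lo + hi) >> 1
--         if frangos <= hatched(m):
--             return search(lo, m)
--         return search(m + 1, hi)
--
--     return search(1, maior)
-- ===== Notes on version B (the rewrite author's own statement) =====
-- stated objective: alternative
-- what changed: B slices the relevant prefix of dias once and walks it structurally instead of indexing with range(chocadeiras) each probe, and replaces the iterative while-loop binary search by a recursive descent with the flipped comparison (frangos <= hatched) so the shrink-high branch comes first; same midpoint sequence and arithmetic.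
import Mathlib
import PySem

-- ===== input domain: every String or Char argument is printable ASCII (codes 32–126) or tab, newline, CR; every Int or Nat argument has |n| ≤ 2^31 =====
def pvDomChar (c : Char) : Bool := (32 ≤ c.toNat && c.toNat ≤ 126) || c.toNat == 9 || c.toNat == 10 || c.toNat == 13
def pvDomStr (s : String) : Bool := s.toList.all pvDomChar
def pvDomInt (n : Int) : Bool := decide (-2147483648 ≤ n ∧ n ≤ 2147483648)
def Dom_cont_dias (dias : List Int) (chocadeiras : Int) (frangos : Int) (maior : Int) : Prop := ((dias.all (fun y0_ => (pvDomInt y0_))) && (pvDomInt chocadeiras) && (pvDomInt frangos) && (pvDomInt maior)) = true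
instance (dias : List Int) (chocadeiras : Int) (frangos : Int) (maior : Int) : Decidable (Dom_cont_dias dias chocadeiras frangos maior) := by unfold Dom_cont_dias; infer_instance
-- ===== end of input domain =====

-- B slices the relevant prefix of dias once and walks it by structural recursion, and replaces
-- the iterative binary-search loop by a recursive descent with the flipped comparison; same
-- midpoints and arithmetic (alternative, not faster).


-- midpoint bounds for the termination of both searches (Python's `>> 1` is Lean's `>>> 1`)
theorem pvMidBounds (lo hi : Int) (h : lo < hi) :
    lo ≤ (lo + hi) >>> (1 : Nat) ∧ (lo + hi) >>> (1 : Nat) < hi := by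
  have e : (lo + hi) >>> (1 : Nat) = PySem.Int.floordiv (lo + hi) 2 := by
    rw [Int.shiftRight_eq_div_pow, PySem.Int.floordiv_eq_ediv_of_pos (by norm_num)]
    norm_num
  constructor
  · rw [e]; exact (PySem.Int.floordiv_two_mid_bounds (le_of_lt h)).1
  · rw [e, PySem.Int.floordiv_lt_iff_lt_mul (by norm_num)]; omega

-- ===== PORT A =====
-- busca(dias, chocadeiras, tempo): for i in range(chocadeiras): contador += tempo // dias[i]
-- (dias[i] out of range / dias[i] == 0 raise in Python; those inputs are excluded by Pre_)
def buscaA (dias : List Int) (chocadeiras : Int) (tempo : Int) : Int :=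
  (PySem.List.pyRange 0 chocadeiras 1).foldl
    (fun contador i => contador + PySem.Int.floordiv tempo (PySem.List.pyGetD dias i 0)) 0

-- the while-loop of cont_dias, state (contador, maior)
def contLoopA (dias : List Int) (chocadeiras frangos : Int) (contador maior : Int) : Int :=
  if h : contador < maior then
    let medio := (contador + maior) >>> (1 : Nat)
    if buscaA dias chocadeiras medio < frangos then
      contLoopA dias chocadeiras frangos (medio + 1) maior
    else
      contLoopA dias chocadeiras frangos contador medio
  else maior
termination_by (maior - contador).toNat
decreasing_by
  · have := pvMidBounds contador maior h; omega
  · have := pvMidBounds contador maior h; omega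

def cont_dias (dias : List Int) (chocadeiras : Int) (frangos : Int) (maior : Int) : Int :=
  contLoopA dias chocadeiras frangos 1 maior

-- ===== PORT B =====
-- hatched(t): the for-loop over the materialised prefix `active`, as structural recursion
def hatchedB (active : List Int) (t : Int) : Int :=
  match active with
  | [] => 0
  | d :: rest => PySem.Int.floordiv t d + hatchedB rest t

-- search(lo, hi): recursive descent, shrink-high branch first
def searchB (active : List Int) (frangos : Int) (lo hi : Int) : Int :=
  if _h : hi ≤ lo then hi
  else
    let m := (lo + hi) >>> (1 : Nat)
    if frangos ≤ hatchedB active m then searchB active frangos lo m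
    else searchB active frangos (m + 1) hi
termination_by (hi - lo).toNat
decreasing_by
  · have := pvMidBounds lo hi (by omega); omega
  · have := pvMidBounds lo hi (by omega); omega

-- active = dias[:max(chocadeiras, 0)]
def cont_dias_alt (dias : List Int) (chocadeiras : Int) (frangos : Int) (maior : Int) : Int :=
  searchB (PySem.List.slice dias none (some (max chocadeiras 0))) frangos 1 maior

-- ===== PRECONDITION & SPEC =====
-- Pre_ excludes exactly the inputs on which A raises: when the loop runs (1 < maior) and
-- busca either indexes past the end of dias (IndexError) or divides by a zero among the
-- first chocadeiras entries (ZeroDivisionError).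
def Pre_cont_dias (dias : List Int) (chocadeiras : Int) (frangos : Int) (maior : Int) : Prop :=
  maior ≤ 1 ∨ (chocadeiras ≤ (dias.length : Int) ∧ ∀ x ∈ dias.take chocadeiras.toNat, x ≠ 0)
instance (dias : List Int) (chocadeiras : Int) (frangos : Int) (maior : Int) : Decidable (Pre_cont_dias dias chocadeiras frangos maior) := by unfold Pre_cont_dias; infer_instance
def pvWitness_cont_dias : List Int × Int × Int × Int := ([2, 3, 5], 3, 7, 20)

def Spec_cont_dias (dias : List Int) (chocadeiras : Int) (frangos : Int) (maior : Int) (out : Int) : Prop := out = cont_dias_alt dias chocadeiras frangos maior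
instance (dias : List Int) (chocadeiras : Int) (frangos : Int) (maior : Int) (out : Int) : Decidable (Spec_cont_dias dias chocadeiras frangos maior out) := by unfold Spec_cont_dias; infer_instance

-- ===== CLAIM (what is proved, stated in full; the proofs are below) =====
def Claim_equal_cont_dias : Prop := ∀ (dias : List Int) (chocadeiras : Int) (frangos : Int) (maior : Int), Dom_cont_dias dias chocadeiras frangos maior → Pre_cont_dias dias chocadeiras frangos maior → Spec_cont_dias dias chocadeiras frangos maior (cont_dias dias chocadeiras frangos maior)

-- ===== LEMMAS AND PROOFS =====

-- the structural walk computes the sum over the list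
theorem hatchedB_eq_sum (xs : List Int) (t : Int) :
    hatchedB xs t = (xs.map (fun d => PySem.Int.floordiv t d)).sum := by
  induction xs with
  | nil => rfl
  | cons d rest ih => simp [hatchedB, ih]

-- the slice is the prefix of length chocadeiras.toNat
theorem slice_eq_take (dias : List Int) (chocadeiras : Int) :
    PySem.List.slice dias none (some (max chocadeiras 0)) = dias.take chocadeiras.toNat := by
  have h : max chocadeiras 0 = ((chocadeiras.toNat : Nat) : Int) := by omega
  rw [h, PySem.List.slice_to_natCast]

-- busca agrees with the structural walk over the prefix on the admitted inputs
theorem busca_eq_hatched (dias : List Int) (chocadeiras : Int)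
    (hle : chocadeiras ≤ (dias.length : Int)) (tempo : Int) :
    buscaA dias chocadeiras tempo = hatchedB (dias.take chocadeiras.toNat) tempo := by
  rw [hatchedB_eq_sum]
  unfold buscaA
  by_cases hneg : chocadeiras ≤ 0
  · have h1 : PySem.List.pyRange 0 chocadeiras 1 = [] := by
      rw [PySem.List.pyRange_one]
      simp
      omega
    have h2 : chocadeiras.toNat = 0 := by omega
    simp [h1, h2]
  · have hlen : (dias.take chocadeiras.toNat).length = chocadeiras.toNat := by
      simp; omega
    have hcast : ((dias.take chocadeiras.toNat).length : Int) = chocadeiras := by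
      rw [hlen]; omega
    have hcongr : (PySem.List.pyRange 0 chocadeiras 1).foldl
        (fun contador i => contador + PySem.Int.floordiv tempo (PySem.List.pyGetD dias i 0)) 0
      = (PySem.List.pyRange 0 ((dias.take chocadeiras.toNat).length : Int) 1).foldl
        (fun contador i => contador + PySem.Int.floordiv tempo
          (PySem.List.pyGetD (dias.take chocadeiras.toNat) i 0)) 0 := by
      rw [hcast]
      refine PySem.List.foldl_congr_mem _ _ _ _ ?_
      intro acc i hi
      have hib := (PySem.List.mem_pyRange_one).1 hi
      have hget : PySem.List.pyGetD (dias.take chocadeiras.toNat) i 0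
          = PySem.List.pyGetD dias i 0 := by
        rw [PySem.List.pyGetD_of_nonneg _ _ hib.1, PySem.List.pyGetD_of_nonneg _ _ hib.1]
        have hi1 : i.toNat < chocadeiras.toNat := by omega
        have : i.toNat < dias.length := by omega
        rw [List.getD_eq_getElem _ _ (by omega), List.getD_eq_getElem _ _ (by simpa [hlen])]
        simp [List.getElem_take]
      rw [hget]
    rw [hcongr,
      PySem.List.foldl_pyRange_zero_pyGetD' (dias.take chocadeiras.toNat) 0
        (fun contador d => contador + PySem.Int.floordiv tempo d) 0,
      PySem.List.foldl_add (dias.take chocadeiras.toNat) (fun d => PySem.Int.floordiv tempo d) 0]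
    omega

-- the two searches compute the same value whenever busca = hatched
theorem loop_eq (dias active : List Int) (chocadeiras frangos : Int)
    (hb : ∀ t, buscaA dias chocadeiras t = hatchedB active t) :
    ∀ k lo hi, (hi - lo).toNat ≤ k →
      contLoopA dias chocadeiras frangos lo hi = searchB active frangos lo hi := by
  intro k
  induction k with
  | zero =>
    intro lo hi hk
    have hge : hi ≤ lo := by omega
    rw [contLoopA, searchB]
    simp [not_lt.2 hge, hge]
  | succ k ih =>
    intro lo hi hk
    rw [contLoopA, searchB]
    by_cases h : lo < hi
    · have hm := pvMidBounds lo hi h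
      simp only [h, dite_true, not_le.2 h, dite_false, hb]
      by_cases hc : hatchedB active ((lo + hi) >>> (1 : Nat)) < frangos
      · rw [if_pos hc, if_neg (by omega)]
        exact ih _ _ (by omega)
      · rw [if_neg hc, if_pos (by omega)]
        exact ih lo _ (by omega)
    · simp [h, not_lt.1 h]

-- ===== VERDICT (by name: the statement is the Claim_ definition above) =====
theorem cont_dias_spec : Claim_equal_cont_dias := by
  intro dias chocadeiras frangos maior _ hpre
  unfold Spec_cont_dias cont_dias cont_dias_alt
  rw [slice_eq_take]
  rcases hpre with hsmall | ⟨hle, _⟩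
  · rw [contLoopA, searchB]
    simp [not_lt.2 hsmall, hsmall]
  · exact loop_eq dias _ chocadeiras frangos
      (busca_eq_hatched dias chocadeiras hle) (maior - 1).toNat 1 maior (by omega)
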